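-- pv_equiv track=rewrite | github.com/codeOlam/socimo | app/class_cluster.py | fetch_cate
-- ===== SOURCE A (Python) =====
-- def fetch_cate(h1, h2, h3, h4):
-- 	heal = []
-- 	poli = []
-- 	sec = []
-- 	eco = []
--
-- 	for a, b, c, d in zip(h1, h2, h3, h4):
-- 		m = max(a, b, c, d)
-- 		if m == a:
-- 			heal.append(1)
-- 		else:
-- 			heal.append(0)
-- 		if m == b:
-- 			poli.append(1)
-- 		else:
-- 			poli.append(0)
-- 		if m == c:
-- 			sec.append(1)
-- 		else:
-- 			sec.append(0)
-- 		if m == d: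
-- 			eco.append(1)
-- 		else:
-- 			eco.append(0)
--
-- 	return heal, poli, sec, eco
-- ===== SOURCE B (Python) =====
-- def fetch_cate(h1, h2, h3, h4):
--     # No maximum is computed: an entry is flagged iff it dominates (>=) every
--     # entry of its row.  Build the 4-wide flag matrix, then transpose it.
--     flags = [[int(all(x >= y for y in row)) for x in row]
--              for row in zip(h1, h2, h3, h4)]
--     return ([f[0] for f in flags], [f[1] for f in flags],
--             [f[2] for f in flags], [f[3] for f in flags])
-- ===== Notes on version B (the rewrite author's own statement) =====
-- stated objective: alternative
-- what changed: B never computes the row maximum: each flag is obtained by direct pairwise dominance tests (entry >= every entry of its row), producing a flag matrix that is then transposed into the four output columns, instead of A's fused max-then-compare loop with four accumulators.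
import Mathlib
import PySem

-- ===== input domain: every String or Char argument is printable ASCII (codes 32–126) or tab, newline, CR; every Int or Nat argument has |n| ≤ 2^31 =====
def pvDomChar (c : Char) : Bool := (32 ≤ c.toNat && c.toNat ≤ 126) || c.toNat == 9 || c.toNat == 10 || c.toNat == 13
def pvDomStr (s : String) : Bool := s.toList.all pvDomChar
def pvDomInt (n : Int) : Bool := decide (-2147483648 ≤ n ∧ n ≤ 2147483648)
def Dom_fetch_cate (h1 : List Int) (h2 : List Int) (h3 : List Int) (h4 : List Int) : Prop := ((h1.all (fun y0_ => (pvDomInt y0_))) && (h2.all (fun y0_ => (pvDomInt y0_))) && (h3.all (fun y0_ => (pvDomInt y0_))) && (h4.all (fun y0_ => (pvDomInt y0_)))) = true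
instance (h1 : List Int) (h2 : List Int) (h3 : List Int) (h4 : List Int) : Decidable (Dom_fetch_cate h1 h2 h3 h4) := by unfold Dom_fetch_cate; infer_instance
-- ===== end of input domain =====

-- ===== PORT A =====
-- B replaces A's fused max-then-compare loop by pairwise dominance tests
-- (no maximum computed) building a flag matrix that is transposed (alternative).

-- the for-loop of A: fold over zip(h1,h2,h3,h4) with the four accumulator lists
def fetchLoopA : List (Int × Int × Int × Int) → List Int → List Int → List Int → List Int →
    List Int × List Int × List Int × List Int
  | [], heal, poli, sec, eco => (heal, poli, sec, eco)
  | (a, b, c, d) :: rest, heal, poli, sec, eco =>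
      let m := max a (max b (max c d))
      fetchLoopA rest
        (heal ++ [if m = a then (1 : Int) else 0])
        (poli ++ [if m = b then (1 : Int) else 0])
        (sec ++ [if m = c then (1 : Int) else 0])
        (eco ++ [if m = d then (1 : Int) else 0])

def fetch_cate (h1 : List Int) (h2 : List Int) (h3 : List Int) (h4 : List Int) :
    List Int × List Int × List Int × List Int :=
  fetchLoopA (h1.zip (h2.zip (h3.zip h4))) [] [] [] []

-- ===== PORT B =====
-- one row's flag list: each entry flagged iff it is ≥ every entry of the row
def rowFlags (row : List Int) : List Int :=
  row.map (fun x => if row.all (fun y => decide (x ≥ y)) then (1 : Int) else 0)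

def fetch_cate_alt (h1 : List Int) (h2 : List Int) (h3 : List Int) (h4 : List Int) :
    List Int × List Int × List Int × List Int :=
  let flags := (h1.zip (h2.zip (h3.zip h4))).map
    (fun p => rowFlags [p.1, p.2.1, p.2.2.1, p.2.2.2])
  (flags.map (fun f => f.getD 0 0), flags.map (fun f => f.getD 1 0),
   flags.map (fun f => f.getD 2 0), flags.map (fun f => f.getD 3 0))

-- ===== PRECONDITION & SPEC =====
def Spec_fetch_cate (h1 : List Int) (h2 : List Int) (h3 : List Int) (h4 : List Int) (out : List Int × List Int × List Int × List Int) : Prop := out = fetch_cate_alt h1 h2 h3 h4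
instance (h1 : List Int) (h2 : List Int) (h3 : List Int) (h4 : List Int) (out : List Int × List Int × List Int × List Int) : Decidable (Spec_fetch_cate h1 h2 h3 h4 out) := by unfold Spec_fetch_cate; infer_instance

-- ===== CLAIM (what is proved, stated in full; the proofs are below) =====
def Claim_equal_fetch_cate : Prop := ∀ (h1 : List Int) (h2 : List Int) (h3 : List Int) (h4 : List Int), Dom_fetch_cate h1 h2 h3 h4 → Spec_fetch_cate h1 h2 h3 h4 (fetch_cate h1 h2 h3 h4)

-- ===== LEMMAS AND PROOFS =====
-- one flag column of A's loop, as a map over the zipped rows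
def gflag (sel : Int × Int × Int × Int → Int) (zs : List (Int × Int × Int × Int)) : List Int :=
  zs.map (fun p => if max p.1 (max p.2.1 (max p.2.2.1 p.2.2.2)) = sel p then 1 else 0)

theorem fetchLoopA_eq (zs : List (Int × Int × Int × Int)) (ha hb hc hd : List Int) :
    fetchLoopA zs ha hb hc hd =
      (ha ++ gflag (fun p => p.1) zs, hb ++ gflag (fun p => p.2.1) zs,
       hc ++ gflag (fun p => p.2.2.1) zs, hd ++ gflag (fun p => p.2.2.2) zs) := by
  induction zs generalizing ha hb hc hd with
  | nil => simp only [fetchLoopA, gflag, List.map_nil, List.append_nil]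
  | cons z rest ih =>
      obtain ⟨a, b, c, d⟩ := z
      simp only [fetchLoopA]
      rw [ih]
      simp only [gflag, List.map_cons, List.append_assoc, List.singleton_append]

theorem flag_col (sel : Int × Int × Int × Int → Int) (k : ℕ)
    (hrow : ∀ a b c d : Int,
      (rowFlags [a, b, c, d]).getD k 0
        = if max a (max b (max c d)) = sel (a, b, c, d) then (1 : Int) else 0) :
    ∀ zs : List (Int × Int × Int × Int),
      (zs.map (fun p => rowFlags [p.1, p.2.1, p.2.2.1, p.2.2.2])).map (fun f => f.getD k 0)
        = gflag sel zs := by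
  intro zs
  rw [List.map_map]
  unfold gflag
  refine List.map_congr_left ?_
  rintro ⟨a, b, c, d⟩ _
  exact hrow a b c d

theorem fetch_cate_eq (h1 h2 h3 h4 : List Int) :
    fetch_cate h1 h2 h3 h4 = fetch_cate_alt h1 h2 h3 h4 := by
  dsimp only [fetch_cate, fetch_cate_alt]
  rw [fetchLoopA_eq]
  simp only [List.nil_append, Prod.mk.injEq]
  refine ⟨?_, ?_, ?_, ?_⟩ <;>
    refine (flag_col _ _ ?_ _).symm <;>
    intro a b c d <;>
    · simp only [rowFlags, List.map_cons, List.map_nil, List.all_cons, List.all_nil,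
        List.getD, List.getElem?_cons_zero, List.getElem?_cons_succ, Option.getD_some,
        Bool.and_true, Bool.and_eq_true, decide_eq_true_eq, ge_iff_le]
      split_ifs <;> first | rfl | omega

-- ===== VERDICT (by name: the statement is the Claim_ definition above) =====
theorem fetch_cate_spec : Claim_equal_fetch_cate := by
  intro h1 h2 h3 h4 _
  exact fetch_cate_eq h1 h2 h3 h4
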